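-- pv_equiv track=rewrite | github.com/DaveGerson/agent-baton | agent_baton/core/engine/artifact_validator.py | _common_dir_prefix
-- ===== SOURCE A (Python) =====
-- def _common_dir_prefix(a: str, b: str) -> str:
--     a_dir = a.rsplit("/", 1)[0] if "/" in a else ""
--     b_dir = b.rsplit("/", 1)[0] if "/" in b else ""
--     out: list[str] = []
--     for x, y in zip(a_dir.split("/"), b_dir.split("/")):
--         if x != y:
--             break
--         out.append(x)
--     return "/".join(out)
-- ===== SOURCE B (Python) =====
-- def _common_dir_prefix(a: str, b: str) -> str:
--     a_dir = a.rsplit("/", 1)[0] if "/" in a else ""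
--     b_dir = b.rsplit("/", 1)[0] if "/" in b else ""
--     # longest common character prefix of the two dirs with a '/' sentinel appended,
--     # then snapped back to the last component boundary
--     s, t = a_dir + "/", b_dir + "/"
--     n = 0
--     m = min(len(s), len(t))
--     while n < m and s[n] == t[n]:
--         n += 1
--     common = s[:n]
--     i = common.rfind("/")
--     return common[:i] if i >= 0 else ""
-- ===== Notes on version B (the rewrite author's own statement) =====
-- stated objective: idiomatic
-- what changed: Replaces A's split-into-components comparison loop by a character-level longest-common-prefix scan over the two directory strings with a '/' sentinel appended, trimmed back to the last '/' (the standard os.path.commonprefix idiom).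
import Mathlib
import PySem

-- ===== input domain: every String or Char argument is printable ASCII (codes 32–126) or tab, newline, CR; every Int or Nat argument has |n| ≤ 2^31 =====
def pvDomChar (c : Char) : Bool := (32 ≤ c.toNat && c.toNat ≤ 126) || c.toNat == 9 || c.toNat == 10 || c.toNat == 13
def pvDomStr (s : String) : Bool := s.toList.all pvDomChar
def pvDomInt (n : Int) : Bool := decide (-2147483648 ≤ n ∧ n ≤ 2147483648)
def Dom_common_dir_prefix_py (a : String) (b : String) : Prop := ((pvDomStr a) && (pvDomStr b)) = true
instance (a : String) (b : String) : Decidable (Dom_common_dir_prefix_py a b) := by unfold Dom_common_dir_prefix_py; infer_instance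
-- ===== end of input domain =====

set_option maxRecDepth 8192


-- B computes the same common directory prefix by a character-level common-prefix scan
-- (with a '/' sentinel) trimmed back to the last '/', instead of A's split-into-components
-- comparison loop; same cost, more idiomatic (objective: alternative/idiomatic).

-- ===== PORT A =====
-- shared line of both Pythons: `s.rsplit("/", 1)[0] if "/" in s else ""`;
-- with "/" in s, s.rsplit("/", 1)[0] is exactly the characters before the LAST '/'
-- (hand port of rsplit(sep, 1)[0], exact under the isIn guard; rfind = PySem.Chars.rfind).
def pvDirOf (s : String) : List Char :=
  if PySem.Str.isIn "/" s then
    s.toList.take (PySem.Chars.rfind s.toList ['/']).toNat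
  else []

-- A's `for x, y in zip(...): if x != y: break; out.append(x)` loop
def pvLoopA : List (List Char × List Char) → List (List Char)
  | [] => []
  | (x, y) :: rest => if x ≠ y then [] else x :: pvLoopA rest

def common_dir_prefix_py (a : String) (b : String) : String :=
  let a_dir := pvDirOf a
  let b_dir := pvDirOf b
  let out := pvLoopA ((PySem.Chars.splitOn a_dir ['/']).zip (PySem.Chars.splitOn b_dir ['/']))
  String.ofList (PySem.Chars.join ['/'] out)

-- ===== PORT B =====
-- B's manual `while n < m and s[n] == t[n]` char-zip loop, as structural recursion
def pvCommonPrefix : List Char → List Char → List Char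
  | c :: u, d :: v => if c = d then c :: pvCommonPrefix u v else []
  | _, _ => []

def common_dir_prefix_py_alt (a : String) (b : String) : String :=
  let s := pvDirOf a ++ ['/']                       -- a_dir + "/"
  let t := pvDirOf b ++ ['/']                       -- b_dir + "/"
  let common := pvCommonPrefix s t
  let i := PySem.Chars.rfind common ['/']
  -- common[:i] with 0 ≤ i ≤ len(common) is exactly List.take i.toNat
  if 0 ≤ i then String.ofList (common.take i.toNat) else ""

-- ===== PRECONDITION & SPEC =====
def Spec_common_dir_prefix_py (a : String) (b : String) (out : String) : Prop := out = common_dir_prefix_py_alt a b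
instance (a : String) (b : String) (out : String) : Decidable (Spec_common_dir_prefix_py a b out) := by unfold Spec_common_dir_prefix_py; infer_instance

-- ===== CLAIM (what is proved, stated in full; the proofs are below) =====
def Claim_equal_common_dir_prefix_py : Prop := ∀ (a : String) (b : String), Dom_common_dir_prefix_py a b → Spec_common_dir_prefix_py a b (common_dir_prefix_py a b)

-- ===== LEMMAS AND PROOFS =====

-- simple recursive characterisation of str.split on the single-char separator '/'
def sr : List Char → List (List Char)
  | [] => [[]]
  | c :: u => if c = '/' then [] :: sr u else (sr u).modifyHead (c :: ·)

lemma splitOn_go_spec (fuel : Nat) : ∀ (u cur : List Char) (acc : List (List Char)),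
    u.length ≤ fuel →
    PySem.Chars.splitOn.go ['/'] fuel u cur acc
      = acc.reverse ++ (sr u).modifyHead (cur.reverse ++ ·) := by
  induction fuel with
  | zero =>
    intro u cur acc h
    have : u = [] := by cases u <;> simp_all
    subst this
    simp [PySem.Chars.splitOn.go, sr]
  | succ n ih =>
    intro u cur acc h
    cases u with
    | nil => simp [PySem.Chars.splitOn.go, sr]
    | cons c rest =>
      by_cases hc : c = '/'
      · subst hc
        rw [show PySem.Chars.splitOn.go ['/'] (n+1) ('/'::rest) cur acc
              = PySem.Chars.splitOn.go ['/'] n rest [] (cur.reverse :: acc) from by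
            simp [PySem.Chars.splitOn.go, List.isPrefixOf]]
        rw [ih rest [] _ (by simpa using Nat.le_of_succ_le_succ h)]
        cases hsr : sr rest <;> simp [sr, hsr]
      · simp only [PySem.Chars.splitOn.go, List.isPrefixOf, Bool.and_true]
        rw [if_neg (by simp [hc]; exact fun hh => hc hh.symm)]
        rw [ih rest (c :: cur) acc (by simpa using Nat.le_of_succ_le_succ h)]
        cases hsr : sr rest with
        | nil => simp [sr, hc, hsr]
        | cons hh tt => simp [sr, hc, hsr]

lemma splitOn_eq_sr (u : List Char) : PySem.Chars.splitOn u ['/'] = sr u := by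
  rw [PySem.Chars.splitOn, splitOn_go_spec (u.length + 1) u [] [] (by omega)]
  cases h : sr u <;> simp

lemma sr_ne_nil (u : List Char) : sr u ≠ [] := by
  induction u with
  | nil => simp [sr]
  | cons c u ih =>
    by_cases hc : c = '/'
    · simp [sr, hc]
    · cases hsr : sr u with
      | nil => exact absurd hsr ih
      | cons h t => simp [sr, hc, hsr]

lemma pfx_cons (c : Char) (t : List Char) : (['/'].isPrefixOf (c::t)) = ('/' == c) := by
  show ('/' == c && [].isPrefixOf t) = _
  simp

lemma rgo_zero (s : List Char) :
    PySem.Chars.rfind.go s ['/'] 0 = if ['/'].isPrefixOf s then 0 else -1 := by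
  simp [PySem.Chars.rfind.go]

lemma rgo_succ (s : List Char) (j : Nat) :
    PySem.Chars.rfind.go s ['/'] (j+1)
      = if ['/'].isPrefixOf (s.drop (j+1)) then ((j : Int)+1) else PySem.Chars.rfind.go s ['/'] j := by
  simp [PySem.Chars.rfind.go]

lemma rgo_cons (k : Nat) (c : Char) (t : List Char) :
    PySem.Chars.rfind.go (c::t) ['/'] (k+1)
      = if PySem.Chars.rfind.go t ['/'] k ≠ -1 then PySem.Chars.rfind.go t ['/'] k + 1
        else if c = '/' then 0 else -1 := by
  induction k with
  | zero =>
    rw [rgo_succ, rgo_zero, rgo_zero]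
    simp only [List.drop_succ_cons, List.drop_zero]
    rw [pfx_cons]
    by_cases hp : ['/'].isPrefixOf t
    · simp [hp]
    · by_cases hc : c = '/'
      · subst hc; simp [hp]
      · have h1 : ('/' == c) = false := beq_eq_false_iff_ne.mpr (fun h => hc h.symm)
        simp [hp, hc, h1]
  | succ k ih =>
    rw [rgo_succ, rgo_succ t k]
    simp only [List.drop_succ_cons]
    by_cases hp : ['/'].isPrefixOf (t.drop (k+1))
    · rw [if_pos hp, if_pos hp, if_pos (by push_cast; omega)]
      push_cast; ring
    · rw [if_neg hp, if_neg hp, ih]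

lemma rfind_nil : PySem.Chars.rfind [] ['/'] = -1 := by decide

lemma rfind_cons (c : Char) (t : List Char) :
    PySem.Chars.rfind (c::t) ['/']
      = if PySem.Chars.rfind t ['/'] ≠ -1 then PySem.Chars.rfind t ['/'] + 1
        else if c = '/' then 0 else -1 := by
  show PySem.Chars.rfind.go (c::t) ['/'] (c::t).length = _
  rw [List.length_cons, rgo_cons]
  rfl

lemma rfind_ge (t : List Char) : -1 ≤ PySem.Chars.rfind t ['/'] := by
  induction t with
  | nil => rw [rfind_nil]
  | cons c t ih =>
    rw [rfind_cons]
    split_ifs <;> omega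

-- B's trim step, on char lists
def pvTrim (cs : List Char) : List Char :=
  if 0 ≤ PySem.Chars.rfind cs ['/'] then cs.take (PySem.Chars.rfind cs ['/']).toNat else []

lemma pvTrim_cons (c : Char) (w : List Char) :
    pvTrim (c::w) = if PySem.Chars.rfind w ['/'] ≠ -1 then c :: pvTrim w else [] := by
  unfold pvTrim
  rw [rfind_cons]
  by_cases h : PySem.Chars.rfind w ['/'] ≠ -1
  · have h0 : 0 ≤ PySem.Chars.rfind w ['/'] := by have := rfind_ge w; omega
    rw [if_pos h, if_pos h, if_pos (by omega), if_pos h0]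
    have : (PySem.Chars.rfind w ['/'] + 1).toNat = (PySem.Chars.rfind w ['/']).toNat + 1 := by omega
    rw [this, List.take_succ_cons]
  · rw [if_neg h, if_neg h]
    by_cases hc : c = '/' <;> simp [hc]

lemma rfind_cons_ne (c : Char) (w : List Char) :
    (PySem.Chars.rfind (c::w) ['/'] ≠ -1) ↔ (PySem.Chars.rfind w ['/'] ≠ -1 ∨ c = '/') := by
  rw [rfind_cons]
  have := rfind_ge w
  by_cases h : PySem.Chars.rfind w ['/'] ≠ -1
  · simp [h]; omega
  · by_cases hc : c = '/' <;> simp [h, hc]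

lemma join_cons_head (c : Char) (h : List Char) (L : List (List Char)) :
    PySem.Chars.join ['/'] ((c::h)::L) = c :: PySem.Chars.join ['/'] (h::L) := by
  cases L with
  | nil => rw [PySem.Chars.join_singleton, PySem.Chars.join_singleton]
  | cons y l => rw [PySem.Chars.join_cons_cons, PySem.Chars.join_cons_cons]; simp

-- the main invariant: B's trimmed char-prefix is A's joined component-prefix,
-- and the trim guard fires exactly when A's loop keeps at least its first component
lemma pv_main : ∀ (u v : List Char),
    (PySem.Chars.rfind (pvCommonPrefix (u++['/']) (v++['/'])) ['/'] ≠ -1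
      ↔ pvLoopA ((sr u).zip (sr v)) ≠ [])
  ∧ pvTrim (pvCommonPrefix (u++['/']) (v++['/']))
      = PySem.Chars.join ['/'] (pvLoopA ((sr u).zip (sr v))) := by
  intro u
  induction u with
  | nil =>
    intro v
    cases v with
    | nil => constructor <;> decide
    | cons d v' =>
      by_cases hd : d = '/'
      · subst hd
        -- cp ['/'] ('/'::v'++['/']) = ['/']; A's first components are both []
        simp only [List.nil_append, List.cons_append]
        have h1 : pvCommonPrefix ['/'] ('/' :: (v' ++ ['/'])) = ['/'] := by
          show (if ('/' : Char) = '/' then '/' :: pvCommonPrefix [] (v' ++ ['/']) else []) = ['/']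
          rw [if_pos rfl]
          cases v' ++ ['/'] <;> rfl
        rw [h1]
        have h2 : (sr []).zip (sr ('/'::v')) = [([], [])] := by simp [sr]
        rw [h2, show pvLoopA [(([] : List Char), ([] : List Char))] = [[]] from by simp [pvLoopA]]
        constructor
        · simp [show PySem.Chars.rfind ['/'] ['/'] = 0 from by decide]
        · simp [pvTrim, show PySem.Chars.rfind ['/'] ['/'] = 0 from by decide,
            PySem.Chars.join_singleton]
      · -- heads [] vs d::…  differ, and cp stops at '/' vs d
        obtain ⟨h, t, hsr⟩ : ∃ h t, sr v' = h :: t := by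
          cases hs : sr v' with
          | nil => exact absurd hs (sr_ne_nil v')
          | cons h t => exact ⟨h, t, rfl⟩
        simp only [List.nil_append, List.cons_append]
        have h1 : pvCommonPrefix ['/'] (d :: (v' ++ ['/'])) = [] := by
          show (if ('/' : Char) = d then '/' :: pvCommonPrefix [] (v' ++ ['/']) else []) = []
          rw [if_neg (fun hh => hd hh.symm)]
        rw [h1, show sr (d::v') = (d::h)::t from by simp [sr, hd, hsr]]
        constructor
        · simp [rfind_nil, sr, pvLoopA]
        · simp [pvTrim, rfind_nil, sr, pvLoopA, PySem.Chars.join_nil]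
  | cons c u' ih =>
    intro v
    cases v with
    | nil =>
      by_cases hc : c = '/'
      · subst hc
        simp only [List.cons_append, List.nil_append]
        have h1 : pvCommonPrefix ('/' :: (u' ++ ['/'])) ['/'] = ['/'] := by
          show (if ('/' : Char) = '/' then '/' :: pvCommonPrefix (u' ++ ['/']) [] else []) = ['/']
          rw [if_pos rfl]
          cases u' ++ ['/'] <;> rfl
        rw [h1]
        have h2 : (sr ('/'::u')).zip (sr []) = [([], [])] := by simp [sr]
        rw [h2, show pvLoopA [(([] : List Char), ([] : List Char))] = [[]] from by simp [pvLoopA]]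
        constructor
        · simp [show PySem.Chars.rfind ['/'] ['/'] = 0 from by decide]
        · simp [pvTrim, show PySem.Chars.rfind ['/'] ['/'] = 0 from by decide,
            PySem.Chars.join_singleton]
      · obtain ⟨h, t, hsr⟩ : ∃ h t, sr u' = h :: t := by
          cases hs : sr u' with
          | nil => exact absurd hs (sr_ne_nil u')
          | cons h t => exact ⟨h, t, rfl⟩
        simp only [List.cons_append, List.nil_append]
        have h1 : pvCommonPrefix (c :: (u' ++ ['/'])) ['/'] = [] := by
          show (if c = '/' then c :: pvCommonPrefix (u' ++ ['/']) [] else []) = []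
          rw [if_neg hc]
        rw [h1, show sr (c::u') = (c::h)::t from by simp [sr, hc, hsr]]
        constructor
        · simp [rfind_nil, sr, pvLoopA]
        · simp [pvTrim, rfind_nil, sr, pvLoopA, PySem.Chars.join_nil]
    | cons d v' =>
      obtain ⟨hiff, heq⟩ := ih v'
      by_cases hc : c = '/' <;> by_cases hd : d = '/'
      · -- c = d = '/': both split heads are []
        subst hc; subst hd
        simp only [List.cons_append]
        have h1 : pvCommonPrefix ('/' :: (u' ++ ['/'])) ('/' :: (v' ++ ['/']))
            = '/' :: pvCommonPrefix (u' ++ ['/']) (v' ++ ['/']) := by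
          show (if ('/' : Char) = '/' then _ :: _ else []) = _
          rw [if_pos rfl]
        have h2 : (sr ('/'::u')).zip (sr ('/'::v')) = ([], []) :: (sr u').zip (sr v') := by
          simp [sr]
        rw [h1, h2, show ∀ r, pvLoopA ((([] : List Char), ([] : List Char)) :: r) = [] :: pvLoopA r
            from fun r => by simp [pvLoopA]]
        rw [pvTrim_cons]
        constructor
        · simp [rfind_cons_ne]
        · by_cases hrr : PySem.Chars.rfind (pvCommonPrefix (u' ++ ['/']) (v' ++ ['/'])) ['/'] ≠ -1
          · rw [if_pos hrr, heq]
            obtain ⟨y, l, hl⟩ : ∃ y l, pvLoopA ((sr u').zip (sr v')) = y :: l := by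
              cases hlp : pvLoopA ((sr u').zip (sr v')) with
              | nil => exact absurd hlp (hiff.mp hrr)
              | cons y l => exact ⟨y, l, rfl⟩
            rw [hl, PySem.Chars.join_cons_cons]
            simp
          · rw [if_neg hrr]
            have hz : pvLoopA ((sr u').zip (sr v')) = [] := by
              by_contra hne
              exact hrr (hiff.mpr hne)
            rw [hz, PySem.Chars.join_singleton]
      · -- c = '/', d ≠ '/': cp = [], heads [] vs d::hv
        subst hc
        obtain ⟨h, t, hsr⟩ : ∃ h t, sr v' = h :: t := by
          cases hs : sr v' with
          | nil => exact absurd hs (sr_ne_nil v')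
          | cons h t => exact ⟨h, t, rfl⟩
        simp only [List.cons_append, pvCommonPrefix, sr, hsr, if_pos rfl, if_neg hd]
        rw [if_neg (fun hh => hd hh.symm)]
        simp [pvLoopA, pvTrim, rfind_nil, PySem.Chars.join_nil]
      · -- c ≠ '/', d = '/': symmetric
        subst hd
        obtain ⟨h, t, hsr⟩ : ∃ h t, sr u' = h :: t := by
          cases hs : sr u' with
          | nil => exact absurd hs (sr_ne_nil u')
          | cons h t => exact ⟨h, t, rfl⟩
        simp only [List.cons_append, pvCommonPrefix, sr, hsr, if_pos rfl, if_neg hc]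
        simp [pvLoopA, pvTrim, rfind_nil, PySem.Chars.join_nil, sr]
      · -- c ≠ '/', d ≠ '/'
        obtain ⟨hu, tu, hsru⟩ : ∃ h t, sr u' = h :: t := by
          cases hs : sr u' with
          | nil => exact absurd hs (sr_ne_nil u')
          | cons h t => exact ⟨h, t, rfl⟩
        obtain ⟨hv, tv, hsrv⟩ : ∃ h t, sr v' = h :: t := by
          cases hs : sr v' with
          | nil => exact absurd hs (sr_ne_nil v')
          | cons h t => exact ⟨h, t, rfl⟩
        simp only [List.cons_append, pvCommonPrefix, sr, if_neg hc, if_neg hd,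
          hsru, hsrv, List.modifyHead_cons, List.zip_cons_cons, pvLoopA]
        by_cases hcd : c = d
        · subst hcd
          rw [if_pos rfl]
          by_cases hh : hu = hv
          · subst hh
            rw [if_neg (by simp)]
            have hloop : pvLoopA ((sr u').zip (sr v')) = hu :: pvLoopA (tu.zip tv) := by
              rw [hsru, hsrv]; simp [List.zip_cons_cons, pvLoopA]
            have hW : PySem.Chars.rfind (pvCommonPrefix (u' ++ ['/']) (v' ++ ['/'])) ['/'] ≠ -1 :=
              hiff.mpr (by rw [hloop]; simp)
            rw [pvTrim_cons, if_pos hW, heq, hloop, join_cons_head]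
            constructor
            · rw [rfind_cons_ne]; simp [hW]
            · rfl
          · have hloop : pvLoopA ((sr u').zip (sr v')) = [] := by
              rw [hsru, hsrv]; simp [List.zip_cons_cons, pvLoopA, hh]
            have hW : PySem.Chars.rfind (pvCommonPrefix (u' ++ ['/']) (v' ++ ['/'])) ['/'] = -1 := by
              by_contra hn
              exact (hiff.mp hn) hloop
            rw [if_pos (by simp [hh])]
            rw [pvTrim_cons, if_neg (fun hn => hn hW)]
            constructor
            · rw [rfind_cons_ne]; simp [hW, hc]
            · rw [PySem.Chars.join_nil]
        · rw [if_neg hcd, if_pos (by simp [hcd])]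
          simp [pvTrim, rfind_nil, PySem.Chars.join_nil]

-- ===== VERDICT (by name: the statement is the Claim_ definition above) =====
theorem common_dir_prefix_py_spec : Claim_equal_common_dir_prefix_py := by
  intro a b _hdom
  unfold Spec_common_dir_prefix_py
  show String.ofList (PySem.Chars.join ['/'] (pvLoopA
        ((PySem.Chars.splitOn (pvDirOf a) ['/']).zip (PySem.Chars.splitOn (pvDirOf b) ['/']))))
      = common_dir_prefix_py_alt a b
  rw [splitOn_eq_sr, splitOn_eq_sr]
  show _ = (if 0 ≤ PySem.Chars.rfind (pvCommonPrefix (pvDirOf a ++ ['/']) (pvDirOf b ++ ['/'])) ['/']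
      then String.ofList ((pvCommonPrefix (pvDirOf a ++ ['/']) (pvDirOf b ++ ['/'])).take
        (PySem.Chars.rfind (pvCommonPrefix (pvDirOf a ++ ['/']) (pvDirOf b ++ ['/'])) ['/']).toNat)
      else "")
  obtain ⟨hiff, heq⟩ := pv_main (pvDirOf a) (pvDirOf b)
  by_cases h0 : 0 ≤ PySem.Chars.rfind (pvCommonPrefix (pvDirOf a ++ ['/']) (pvDirOf b ++ ['/'])) ['/']
  · rw [if_pos h0, ← heq]
    unfold pvTrim
    rw [if_pos h0]
  · rw [if_neg h0, ← heq]
    unfold pvTrim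
    rw [if_neg h0]
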